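-- pv_equiv track=rewrite | github.com/shigsdev/windesktopmgr | baseline.py | _correlate_install
-- ===== SOURCE A (Python) =====
-- def _correlate_install(image_path: str, signer: str, recent_installs: list) -> dict | None:
--     """Pick the most-likely related software install from ``recent_installs``.
--
--     Heuristics (highest priority first):
--       1. Publisher matches the digital signer
--       2. Software name appears in the image_path (e.g. "Adobe" in
--          "C:\\Program Files\\Adobe\\Reader\\acrord.exe")
--       3. Software's name OR publisher appears in the image_path (case-
--          insensitive substring)
--
--     Returns the matched install dict (with ``match_reason`` added) or None.
--     """
--     if not recent_installs:
--         return None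
--     path_lc = (image_path or "").lower()
--     signer_lc = (signer or "").lower()
--
--     # Tier 1: publisher matches signer
--     if signer_lc:
--         for entry in recent_installs:
--             pub = (entry.get("publisher") or "").lower()
--             if pub and pub in signer_lc or (signer_lc and signer_lc in pub):
--                 return {**entry, "match_reason": "publisher matches binary signer"}
--
--     # Tier 2: software name appears in image_path
--     for entry in recent_installs:
--         name = (entry.get("name") or "").lower()
--         if name and len(name) >= 4 and name in path_lc:
--             return {**entry, "match_reason": "software name appears in binary path"}
--
--     # Tier 3: publisher appears in image_path
--     for entry in recent_installs:
--         pub = (entry.get("publisher") or "").lower()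
--         if pub and len(pub) >= 4 and pub in path_lc:
--             return {**entry, "match_reason": "publisher name appears in binary path"}
--
--     return None
-- ===== SOURCE B (Python) =====
-- def _correlate_install(image_path: str, signer: str, recent_installs: list) -> dict | None:
--     """Single pass: score each entry's best matching tier, keep the earliest
--     entry with the lowest tier, then attach the tier's reason."""
--     if not recent_installs:
--         return None
--     path_lc = (image_path or "").lower()
--     signer_lc = (signer or "").lower()
--
--     best = None  # (tier, reason, entry)
--     for entry in recent_installs:
--         pub = (entry.get("publisher") or "").lower()
--         name = (entry.get("name") or "").lower()
--         if signer_lc and ((pub and pub in signer_lc) or signer_lc in pub):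
--             tier, reason = 1, "publisher matches binary signer"
--         elif name and len(name) >= 4 and name in path_lc:
--             tier, reason = 2, "software name appears in binary path"
--         elif pub and len(pub) >= 4 and pub in path_lc:
--             tier, reason = 3, "publisher name appears in binary path"
--         else:
--             continue
--         if best is None or tier < best[0]:
--             best = (tier, reason, entry)
--     if best is None:
--         return None
--     return {**best[2], "match_reason": best[1]}
-- ===== Notes on version B (the rewrite author's own statement) =====
-- stated objective: alternative
-- what changed: Replaces A's three sequential passes (one per tier) over recent_installs with a single pass that scores each entry's best tier and keeps the earliest entry with the lowest tier.
import Mathlib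
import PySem

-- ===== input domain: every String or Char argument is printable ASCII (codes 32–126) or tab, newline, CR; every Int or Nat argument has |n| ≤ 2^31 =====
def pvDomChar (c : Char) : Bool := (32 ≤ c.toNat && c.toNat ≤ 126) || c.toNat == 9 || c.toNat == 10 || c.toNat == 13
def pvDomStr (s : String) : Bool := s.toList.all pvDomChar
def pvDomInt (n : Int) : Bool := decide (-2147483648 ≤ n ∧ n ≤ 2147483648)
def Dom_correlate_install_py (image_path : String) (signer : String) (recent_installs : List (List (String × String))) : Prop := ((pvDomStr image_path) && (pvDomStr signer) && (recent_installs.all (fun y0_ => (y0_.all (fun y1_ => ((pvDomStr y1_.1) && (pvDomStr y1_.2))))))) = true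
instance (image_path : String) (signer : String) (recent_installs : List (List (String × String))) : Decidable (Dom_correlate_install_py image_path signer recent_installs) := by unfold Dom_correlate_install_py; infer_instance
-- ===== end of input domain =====

-- B replaces A's three sequential tier passes by ONE pass keeping the earliest lowest-tier entry; same return value (objective: alternative decomposition).


-- ===== PORT A =====
-- shared field accessors: (entry.get("publisher") or "").lower() / (entry.get("name") or "").lower()
def pvPub (e : List (String × String)) : String :=
  PySem.Str.lower (((PySem.Dict.mk e).get? "publisher").getD "")
def pvName (e : List (String × String)) : String :=
  PySem.Str.lower (((PySem.Dict.mk e).get? "name").getD "")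
-- A's three loop tests, verbatim (Python's and/or precedence kept)
def pvCond1 (signer_lc : String) (e : List (String × String)) : Bool :=
  (pvPub e != "" && PySem.Str.isIn (pvPub e) signer_lc) || (signer_lc != "" && PySem.Str.isIn signer_lc (pvPub e))
def pvCond2 (path_lc : String) (e : List (String × String)) : Bool :=
  pvName e != "" && decide (4 ≤ PySem.Str.len (pvName e)) && PySem.Str.isIn (pvName e) path_lc
def pvCond3 (path_lc : String) (e : List (String × String)) : Bool :=
  pvPub e != "" && decide (4 ≤ PySem.Str.len (pvPub e)) && PySem.Str.isIn (pvPub e) path_lc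
-- {**entry, "match_reason": r}
def pvWithReason (e : List (String × String)) (r : String) : List (String × String) :=
  ((PySem.Dict.mk e).insert "match_reason" r).items
-- the three for-loops with early return
def pvA_tier1 (signer_lc : String) : List (List (String × String)) → Option (List (String × String))
  | [] => none
  | e :: rest =>
    if pvCond1 signer_lc e then some (pvWithReason e "publisher matches binary signer")
    else pvA_tier1 signer_lc rest
def pvA_tier2 (path_lc : String) : List (List (String × String)) → Option (List (String × String))
  | [] => none
  | e :: rest =>
    if pvCond2 path_lc e then some (pvWithReason e "software name appears in binary path")
    else pvA_tier2 path_lc rest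
def pvA_tier3 (path_lc : String) : List (List (String × String)) → Option (List (String × String))
  | [] => none
  | e :: rest =>
    if pvCond3 path_lc e then some (pvWithReason e "publisher name appears in binary path")
    else pvA_tier3 path_lc rest

def correlate_install_py (image_path : String) (signer : String) (recent_installs : List (List (String × String))) : Option (List (String × String)) :=
  if recent_installs = [] then none
  else
    let path_lc := PySem.Str.lower (if image_path == "" then "" else image_path)
    let signer_lc := PySem.Str.lower (if signer == "" then "" else signer)
    match (if signer_lc != "" then pvA_tier1 signer_lc recent_installs else none) with
    | some r => some r
    | none =>
      match pvA_tier2 path_lc recent_installs with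
      | some r => some r
      | none => pvA_tier3 path_lc recent_installs

-- ===== PORT B =====
-- B's tier classifier: best (lowest) matching tier of one entry, with its reason
def pvB_tierOf (path_lc signer_lc : String) (e : List (String × String)) : Option (Nat × String) :=
  if signer_lc != "" && ((pvPub e != "" && PySem.Str.isIn (pvPub e) signer_lc) || PySem.Str.isIn signer_lc (pvPub e)) then
    some (1, "publisher matches binary signer")
  else if pvCond2 path_lc e then some (2, "software name appears in binary path")
  else if pvCond3 path_lc e then some (3, "publisher name appears in binary path")
  else none
-- loop body: keep the entry with the strictly smaller tier (earlier entry wins ties)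
def pvB_step (path_lc signer_lc : String)
    (best : Option (Nat × String × List (String × String))) (e : List (String × String)) :
    Option (Nat × String × List (String × String)) :=
  match pvB_tierOf path_lc signer_lc e with
  | none => best
  | some (t, r) =>
    match best with
    | none => some (t, r, e)
    | some (t0, r0, e0) => if t < t0 then some (t, r, e) else some (t0, r0, e0)

def correlate_install_py_alt (image_path : String) (signer : String) (recent_installs : List (List (String × String))) : Option (List (String × String)) :=
  if recent_installs = [] then none
  else
    let path_lc := PySem.Str.lower (if image_path == "" then "" else image_path)
    let signer_lc := PySem.Str.lower (if signer == "" then "" else signer)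
    match recent_installs.foldl (pvB_step path_lc signer_lc) none with
    | none => none
    | some (_, r, e) => some (pvWithReason e r)

-- ===== PRECONDITION & SPEC =====
def Spec_correlate_install_py (image_path : String) (signer : String) (recent_installs : List (List (String × String))) (out : Option (List (String × String))) : Prop := out = correlate_install_py_alt image_path signer recent_installs
instance (image_path : String) (signer : String) (recent_installs : List (List (String × String))) (out : Option (List (String × String))) : Decidable (Spec_correlate_install_py image_path signer recent_installs out) := by unfold Spec_correlate_install_py; infer_instance

-- ===== CLAIM (what is proved, stated in full; the proofs are below) =====
def Claim_equal_correlate_install_py : Prop := ∀ (image_path : String) (signer : String) (recent_installs : List (List (String × String))), Dom_correlate_install_py image_path signer recent_installs → Spec_correlate_install_py image_path signer recent_installs (correlate_install_py image_path signer recent_installs)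

-- ===== LEMMAS AND PROOFS =====

-- left-biased merge of two loop states (the later one wins only with a strictly smaller tier)
def pvMerge : Option (Nat × String × List (String × String)) → Option (Nat × String × List (String × String)) → Option (Nat × String × List (String × String))
  | a, none => a
  | none, some c => some c
  | some (t0, r0, e0), some (t, r, e) => if t < t0 then some (t, r, e) else some (t0, r0, e0)

def pvR1 : String := "publisher matches binary signer"
def pvR2 : String := "software name appears in binary path"
def pvR3 : String := "publisher name appears in binary path"

-- B's tier-1 test as a named predicate, and pvB_tierOf restated through the named tests
def pvB1 (sl : String) (e : List (String × String)) : Bool :=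
  sl != "" && ((pvPub e != "" && PySem.Str.isIn (pvPub e) sl) || PySem.Str.isIn sl (pvPub e))

theorem pvTierOf_eq (p sl : String) (e : List (String × String)) :
    pvB_tierOf p sl e = if pvB1 sl e then some (1, pvR1) else if pvCond2 p e then some (2, pvR2) else if pvCond3 p e then some (3, pvR3) else none := rfl

-- the specification of B's fold: first tier-1 match, else first exclusive tier-2 match, else first exclusive tier-3 match
def pvChain (p s : String) (xs : List (List (String × String))) : Option (Nat × String × List (String × String)) :=
  match xs.find? (fun e => decide (pvB_tierOf p s e = some (1, pvR1))) with
  | some e => some (1, pvR1, e)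
  | none =>
    match xs.find? (fun e => decide (pvB_tierOf p s e = some (2, pvR2))) with
    | some e => some (2, pvR2, e)
    | none =>
      (xs.find? (fun e => decide (pvB_tierOf p s e = some (3, pvR3)))).map (fun e => (3, pvR3, e))

theorem pvStep_eq_merge (p s : String) (acc : Option (Nat × String × List (String × String))) (x : List (String × String)) :
    pvB_step p s acc x = pvMerge acc (pvB_step p s none x) := by
  unfold pvB_step
  cases pvB_tierOf p s x with
  | none => cases acc with
    | none => rfl
    | some a => rfl
  | some tr =>
    obtain ⟨t, r⟩ := tr
    cases acc with
    | none => rfl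
    | some a => obtain ⟨t0, r0, e0⟩ := a; rfl

theorem pvMerge_assoc (a b c : Option (Nat × String × List (String × String))) :
    pvMerge (pvMerge a b) c = pvMerge a (pvMerge b c) := by
  cases a with
  | none =>
    cases b with
    | none => cases c <;> rfl
    | some vb =>
      obtain ⟨tb, rb, eb⟩ := vb
      cases c with
      | none => rfl
      | some vc =>
        obtain ⟨tc, rc, ec⟩ := vc
        by_cases h2 : tc < tb <;> simp [pvMerge, h2]
  | some va =>
    obtain ⟨ta, ra, ea⟩ := va
    cases b with
    | none => cases c <;> rfl
    | some vb =>
      obtain ⟨tb, rb, eb⟩ := vb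
      cases c with
      | none => simp [pvMerge]
      | some vc =>
        obtain ⟨tc, rc, ec⟩ := vc
        by_cases h1 : tb < ta <;> by_cases h2 : tc < tb <;> by_cases h3 : tc < ta <;>
          simp [pvMerge, h1, h2, h3] <;> omega

theorem pvMerge_none_left (m : Option (Nat × String × List (String × String))) : pvMerge none m = m := by
  cases m with
  | none => rfl
  | some a => obtain ⟨t, r, e⟩ := a; rfl

theorem pvFold_eq_merge (p s : String) :
    ∀ (xs : List (List (String × String))) (acc : Option (Nat × String × List (String × String))),
      xs.foldl (pvB_step p s) acc = pvMerge acc (xs.foldl (pvB_step p s) none) := by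
  intro xs
  induction xs with
  | nil => intro acc; cases acc <;> rfl
  | cons x xs ih =>
    intro acc
    simp only [List.foldl_cons]
    rw [ih (pvB_step p s acc x), ih (pvB_step p s none x),
        pvStep_eq_merge p s acc x, pvMerge_assoc]

theorem pvMerge_chain_one (p s : String) (xs : List (List (String × String))) (r : String) (e : List (String × String)) :
    pvMerge (some (1, r, e)) (pvChain p s xs) = some (1, r, e) := by
  unfold pvChain
  cases xs.find? (fun e => decide (pvB_tierOf p s e = some (1, pvR1))) with
  | some e1 => rfl
  | none =>
    cases xs.find? (fun e => decide (pvB_tierOf p s e = some (2, pvR2))) with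
    | some e2 => rfl
    | none =>
      cases xs.find? (fun e => decide (pvB_tierOf p s e = some (3, pvR3))) with
      | some e3 => rfl
      | none => rfl

theorem pvTier_cases (p s : String) (x : List (String × String)) :
    pvB_tierOf p s x = none ∨ pvB_tierOf p s x = some (1, pvR1) ∨
    pvB_tierOf p s x = some (2, pvR2) ∨ pvB_tierOf p s x = some (3, pvR3) := by
  rw [pvTierOf_eq]
  split_ifs <;> simp

theorem pvFold_eq_chain (p s : String) (xs : List (List (String × String))) :
    xs.foldl (pvB_step p s) none = pvChain p s xs := by
  induction xs with
  | nil => rfl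
  | cons x xs ih =>
    simp only [List.foldl_cons]
    rw [pvFold_eq_merge p s xs (pvB_step p s none x), ih]
    have hstep : pvB_step p s none x = (pvB_tierOf p s x).map (fun tr => (tr.1, tr.2, x)) := by
      unfold pvB_step
      cases pvB_tierOf p s x with
      | none => rfl
      | some tr => obtain ⟨t, r⟩ := tr; rfl
    rcases pvTier_cases p s x with h | h | h | h
    · -- no tier: the head contributes nothing
      rw [hstep, h, Option.map_none, pvMerge_none_left]
      have c1 : decide (pvB_tierOf p s x = some (1, pvR1)) = false := by simp [h]
      have c2 : decide (pvB_tierOf p s x = some (2, pvR2)) = false := by simp [h]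
      have c3 : decide (pvB_tierOf p s x = some (3, pvR3)) = false := by simp [h]
      conv_rhs => unfold pvChain
      simp only [List.find?_cons, c1, c2, c3]
      conv_lhs => unfold pvChain
    · -- tier 1: the head wins outright
      rw [hstep, h, Option.map_some]
      have c1 : decide (pvB_tierOf p s x = some (1, pvR1)) = true := by simp [h]
      conv_rhs => unfold pvChain
      simp only [List.find?_cons, c1]
      exact pvMerge_chain_one p s xs pvR1 x
    · -- tier 2: the head beats tier-3 tails and later tier-2 entries
      rw [hstep, h, Option.map_some]
      have c1 : decide (pvB_tierOf p s x = some (1, pvR1)) = false := by simp [h, pvR1, pvR2]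
      have c2 : decide (pvB_tierOf p s x = some (2, pvR2)) = true := by simp [h]
      conv_rhs => unfold pvChain
      simp only [List.find?_cons, c1, c2]
      unfold pvChain
      cases hf1 : xs.find? (fun e => decide (pvB_tierOf p s e = some (1, pvR1))) with
      | some e1 => simp [hf1, pvMerge]
      | none =>
        cases hf2 : xs.find? (fun e => decide (pvB_tierOf p s e = some (2, pvR2))) with
        | some e2 => simp [hf2, pvMerge]
        | none =>
          cases hf3 : xs.find? (fun e => decide (pvB_tierOf p s e = some (3, pvR3))) with
          | some e3 => simp [hf3, pvMerge]
          | none => rfl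
    · -- tier 3: the head only survives when nothing else matches
      rw [hstep, h, Option.map_some]
      have c1 : decide (pvB_tierOf p s x = some (1, pvR1)) = false := by simp [h, pvR1, pvR3]
      have c2 : decide (pvB_tierOf p s x = some (2, pvR2)) = false := by simp [h, pvR2, pvR3]
      have c3 : decide (pvB_tierOf p s x = some (3, pvR3)) = true := by simp [h]
      conv_rhs => unfold pvChain
      simp only [List.find?_cons, c1, c2, c3, Option.map_some]
      unfold pvChain
      cases hf1 : xs.find? (fun e => decide (pvB_tierOf p s e = some (1, pvR1))) with
      | some e1 => simp [hf1, pvMerge]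
      | none =>
        cases hf2 : xs.find? (fun e => decide (pvB_tierOf p s e = some (2, pvR2))) with
        | some e2 => simp [hf2, pvMerge]
        | none =>
          cases hf3 : xs.find? (fun e => decide (pvB_tierOf p s e = some (3, pvR3))) with
          | some e3 => simp [hf3, pvMerge]
          | none => rfl

-- find? only depends on the predicate's values on members
theorem pvFindCongr {α : Type} (p q : α → Bool) (l : List α) (h : ∀ x ∈ l, p x = q x) :
    l.find? p = l.find? q := by
  induction l with
  | nil => rfl
  | cons x t ih =>
    simp only [List.find?_cons, h x (by simp)]
    cases hq : q x with
    | true => rfl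
    | false => exact ih (fun y hy => h y (by simp [hy]))

-- B's tier tests, decided, in terms of A's loop tests
theorem pvDec1 (p sl : String) (e : List (String × String)) :
    decide (pvB_tierOf p sl e = some (1, pvR1)) = pvB1 sl e := by
  rw [pvTierOf_eq]
  split_ifs with h1 h2 h3 <;> simp_all [pvR1, pvR2, pvR3]

theorem pvDec2 (p sl : String) (e : List (String × String)) :
    decide (pvB_tierOf p sl e = some (2, pvR2)) = (!pvB1 sl e && pvCond2 p e) := by
  rw [pvTierOf_eq]
  split_ifs with h1 h2 h3 <;> simp_all [pvR1, pvR2, pvR3]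

theorem pvDec3 (p sl : String) (e : List (String × String)) :
    decide (pvB_tierOf p sl e = some (3, pvR3)) = (!pvB1 sl e && !pvCond2 p e && pvCond3 p e) := by
  rw [pvTierOf_eq]
  split_ifs with h1 h2 h3 <;> simp_all [pvR1, pvR2, pvR3]

-- A's hoisted tier-1 guard: pvB1 is A's tier-1 test under the signer_lc guard
theorem pvB1_eq_cond1 (sl : String) (e : List (String × String)) :
    pvB1 sl e = (sl != "" && pvCond1 sl e) := by
  unfold pvB1 pvCond1
  cases h1 : (sl != "") <;>
    cases h2 : (pvPub e != "" && PySem.Str.isIn (pvPub e) sl) <;>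
    cases h3 : PySem.Str.isIn sl (pvPub e) <;> simp [h1, h2, h3]

-- A's loops are first-match searches
theorem pvA1_eq (sl : String) (xs : List (List (String × String))) :
    pvA_tier1 sl xs = (xs.find? (pvCond1 sl)).map (fun e => pvWithReason e pvR1) := by
  induction xs with
  | nil => rfl
  | cons x t ih =>
    unfold pvA_tier1
    rw [List.find?_cons]
    cases h : pvCond1 sl x <;> simp [h, ih, pvR1]

theorem pvA2_eq (p : String) (xs : List (List (String × String))) :
    pvA_tier2 p xs = (xs.find? (pvCond2 p)).map (fun e => pvWithReason e pvR2) := by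
  induction xs with
  | nil => rfl
  | cons x t ih =>
    unfold pvA_tier2
    rw [List.find?_cons]
    cases h : pvCond2 p x <;> simp [h, ih, pvR2]

theorem pvA3_eq (p : String) (xs : List (List (String × String))) :
    pvA_tier3 p xs = (xs.find? (pvCond3 p)).map (fun e => pvWithReason e pvR3) := by
  induction xs with
  | nil => rfl
  | cons x t ih =>
    unfold pvA_tier3
    rw [List.find?_cons]
    cases h : pvCond3 p x <;> simp [h, ih, pvR3]

-- the tier-2/3 tail of both programs agrees once no entry is a tier-1 match
theorem pvTail_eq (p sl : String) (ri : List (List (String × String)))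
    (hb1 : ∀ e ∈ ri, pvB1 sl e = false) :
    (match pvA_tier2 p ri with
     | some r => some r
     | none => pvA_tier3 p ri) =
    (match (match ri.find? (fun e => decide (pvB_tierOf p sl e = some (2, pvR2))) with
            | some e => some ((2 : Nat), pvR2, e)
            | none => (ri.find? (fun e => decide (pvB_tierOf p sl e = some (3, pvR3)))).map (fun e => ((3 : Nat), pvR3, e))) with
     | none => none
     | some (_, r, e) => some (pvWithReason e r)) := by
  rw [pvA2_eq, pvA3_eq]
  have h2 : ri.find? (fun e => decide (pvB_tierOf p sl e = some (2, pvR2))) = ri.find? (pvCond2 p) :=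
    pvFindCongr _ _ _ (fun x hx => by rw [pvDec2, hb1 x hx]; simp)
  rw [h2]
  cases hf2 : ri.find? (pvCond2 p) with
  | some e => simp
  | none =>
    have hc2 : ∀ x ∈ ri, pvCond2 p x = false := fun x hx => by
      have := List.find?_eq_none.mp hf2 x hx; simpa using this
    have h3 : ri.find? (fun e => decide (pvB_tierOf p sl e = some (3, pvR3))) = ri.find? (pvCond3 p) :=
      pvFindCongr _ _ _ (fun x hx => by rw [pvDec3, hb1 x hx, hc2 x hx]; simp)
    rw [h3]
    cases hf3 : ri.find? (pvCond3 p) with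
    | some e => simp
    | none => simp

-- the two bodies agree for arbitrary lowered path/signer strings
theorem pvCore (p sl : String) (ri : List (List (String × String))) :
    (match (if sl != "" then pvA_tier1 sl ri else none) with
     | some r => some r
     | none => match pvA_tier2 p ri with | some r => some r | none => pvA_tier3 p ri) =
    (match ri.foldl (pvB_step p sl) none with
     | none => none
     | some (_, r, e) => some (pvWithReason e r)) := by
  rw [pvFold_eq_chain]
  unfold pvChain
  have h1 : ri.find? (fun e => decide (pvB_tierOf p sl e = some (1, pvR1))) = ri.find? (pvB1 sl) :=
    pvFindCongr _ _ _ (fun x _ => pvDec1 p sl x)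
  rw [h1]
  by_cases hs : (sl != "") = true
  · rw [if_pos hs]
    have hb : ri.find? (pvB1 sl) = ri.find? (pvCond1 sl) :=
      pvFindCongr _ _ _ (fun x _ => by rw [pvB1_eq_cond1, hs]; simp)
    rw [hb, pvA1_eq]
    cases hf1 : ri.find? (pvCond1 sl) with
    | some e => simp
    | none =>
      simp only [Option.map_none]
      have hb1 : ∀ e ∈ ri, pvB1 sl e = false := fun x hx => by
        have := List.find?_eq_none.mp hf1 x hx
        rw [pvB1_eq_cond1]
        simp_all
      exact pvTail_eq p sl ri hb1
  · rw [if_neg hs]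
    have hb1 : ∀ e ∈ ri, pvB1 sl e = false := fun x _ => by
      rw [pvB1_eq_cond1]
      simp_all
    have hf1 : ri.find? (pvB1 sl) = none :=
      List.find?_eq_none.mpr (fun x hx => by simp [hb1 x hx])
    rw [hf1]
    exact pvTail_eq p sl ri hb1

theorem pvMain (image_path signer : String) (recent_installs : List (List (String × String))) :
    correlate_install_py image_path signer recent_installs = correlate_install_py_alt image_path signer recent_installs := by
  unfold correlate_install_py correlate_install_py_alt
  by_cases hnil : recent_installs = []
  · simp [hnil]
  · rw [if_neg hnil, if_neg hnil]
    exact pvCore (PySem.Str.lower (if image_path == "" then "" else image_path))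
      (PySem.Str.lower (if signer == "" then "" else signer)) recent_installs

-- ===== VERDICT (by name: the statement is the Claim_ definition above) =====
theorem correlate_install_py_spec : Claim_equal_correlate_install_py := by
  intro image_path signer recent_installs _
  unfold Spec_correlate_install_py
  exact pvMain image_path signer recent_installs
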